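-- pv_equiv track=rewrite | github.com/macdogg187/C55-tracker | scripts/train_failure_model.py | _detect_signal_columns
-- ===== SOURCE A (Python) =====
-- from typing import Iterable, Sequence
--
-- SIGNAL_ALIASES: dict[str, list[str]] = {
--     "P01": ["p01", "pressure_01", "pressure", "psi"],
--     "P02": ["p02", "pressure_02", "back_pressure", "applied_gas_pressure"],
--     "T01": ["t01", "temp_01", "seal_flush_left"],
--     "T02": ["t02", "temp_02", "seal_flush_middle"],
--     "T03": ["t03", "temp_03", "seal_flush_right"],
--     "T04": ["t04", "temp_04", "pre_hx_temp", "product_loop_pre_hx"],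
--     "T05": ["t05", "temp_05", "post_hx_temp", "product_loop_post_hx"],
-- }
--
-- def _normalise_header(h: str) -> str:
--     no_units = h
--     while "(" in no_units and ")" in no_units:
--         l, r = no_units.find("("), no_units.find(")")
--         if l < r:
--             no_units = no_units[:l] + no_units[r + 1 :]
--         else:
--             break
--     return no_units.strip().lower().replace(" ", "_")
--
-- def _detect_signal_columns(headers: Sequence[str]) -> dict[str, str]:
--     norm = [(h, _normalise_header(h)) for h in headers]
--     found: dict[str, str] = {}
--     for canon, aliases in SIGNAL_ALIASES.items():
--         all_aliases = [canon.lower()] + aliases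
--         for orig, n in norm:
--             if n in all_aliases:
--                 found[canon] = orig
--                 break
--         if canon in found:
--             continue
--         for orig, n in norm:
--             for alias in all_aliases:
--                 if n == alias or n.startswith(f"{alias}_") or n.startswith(f"{alias}-"):
--                     found[canon] = orig
--                     break
--             if canon in found:
--                 break
--     return found
-- ===== SOURCE B (Python) =====
-- from typing import Iterable, Sequence
--
-- SIGNAL_ALIASES: dict[str, list[str]] = {
--     "P01": ["p01", "pressure_01", "pressure", "psi"],
--     "P02": ["p02", "pressure_02", "back_pressure", "applied_gas_pressure"],
--     "T01": ["t01", "temp_01", "seal_flush_left"],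
--     "T02": ["t02", "temp_02", "seal_flush_middle"],
--     "T03": ["t03", "temp_03", "seal_flush_right"],
--     "T04": ["t04", "temp_04", "pre_hx_temp", "product_loop_pre_hx"],
--     "T05": ["t05", "temp_05", "post_hx_temp", "product_loop_post_hx"],
-- }
--
-- def _normalise_header(h: str) -> str:
--     no_units = h
--     while "(" in no_units and ")" in no_units:
--         l, r = no_units.find("("), no_units.find(")")
--         if l < r:
--             no_units = no_units[:l] + no_units[r + 1 :]
--         else:
--             break
--     return no_units.strip().lower().replace(" ", "_")
--
-- def _detect_signal_columns(headers: Sequence[str]) -> dict[str, str]: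
--     # One pass per canonical signal: break on the first exact alias match,
--     # otherwise remember the first prefix match seen while scanning.
--     norm = [(h, _normalise_header(h)) for h in headers]
--     found: dict[str, str] = {}
--     for canon, aliases in SIGNAL_ALIASES.items():
--         all_aliases = [canon.lower()] + aliases
--         first_prefix = None
--         for orig, n in norm:
--             if n in all_aliases:
--                 found[canon] = orig
--                 break
--             if first_prefix is None and any(
--                 n.startswith(a + "_") or n.startswith(a + "-") for a in all_aliases
--             ):
--                 first_prefix = orig
--         else:
--             if first_prefix is not None:
--                 found[canon] = first_prefix
--     return found
-- ===== Notes on version B (the rewrite author's own statement) =====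
-- stated objective: alternative
-- what changed: The two nested scans per signal (exact pass, then a separate prefix pass over all headers) are merged into a single accumulator-carrying pass that breaks on the first exact alias match and remembers the first prefix match.
import Mathlib
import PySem

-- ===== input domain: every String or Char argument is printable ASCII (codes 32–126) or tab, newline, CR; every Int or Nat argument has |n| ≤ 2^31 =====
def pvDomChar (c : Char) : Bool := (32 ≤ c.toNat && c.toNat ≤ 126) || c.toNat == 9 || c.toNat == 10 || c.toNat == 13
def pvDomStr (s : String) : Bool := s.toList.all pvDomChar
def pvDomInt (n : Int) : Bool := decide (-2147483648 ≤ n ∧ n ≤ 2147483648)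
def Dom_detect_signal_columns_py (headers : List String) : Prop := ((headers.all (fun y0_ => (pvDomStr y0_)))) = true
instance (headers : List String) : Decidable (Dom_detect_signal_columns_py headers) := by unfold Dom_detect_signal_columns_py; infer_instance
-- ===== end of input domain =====

-- B merges A's exact-then-prefix double scan per signal into one pass carrying a first-prefix accumulator; equivalence is proved on all inputs.


-- ===== PORT A =====
-- shared module constant SIGNAL_ALIASES
def signalAliases : List (String × List String) :=
  [("P01", ["p01", "pressure_01", "pressure", "psi"]),
   ("P02", ["p02", "pressure_02", "back_pressure", "applied_gas_pressure"]),
   ("T01", ["t01", "temp_01", "seal_flush_left"]),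
   ("T02", ["t02", "temp_02", "seal_flush_middle"]),
   ("T03", ["t03", "temp_03", "seal_flush_right"]),
   ("T04", ["t04", "temp_04", "pre_hx_temp", "product_loop_pre_hx"]),
   ("T05", ["t05", "temp_05", "post_hx_temp", "product_loop_post_hx"])]

-- _normalise_header's while loop, with fuel = len + 1 (each iteration strictly shortens the string, so the fuel never runs out)
def stripUnits : Nat → List Char → List Char
  | 0, cs => cs
  | fuel + 1, cs =>
    if PySem.Chars.isIn ['('] cs && PySem.Chars.isIn [')'] cs then
      let l := PySem.Chars.find cs ['(']
      let r := PySem.Chars.find cs [')']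
      if l < r then
        stripUnits fuel (PySem.Chars.slice cs none (some l) ++ PySem.Chars.slice cs (some (r + 1)) none)
      else cs
    else cs

-- _normalise_header (shared verbatim by A and B)
def normaliseHeader (h : String) : List Char :=
  PySem.Chars.replace (PySem.Chars.lower (PySem.Chars.strip (stripUnits (h.toList.length + 1) h.toList))) [' '] ['_']

-- A, second loop's per-alias condition: n == alias or n.startswith(alias+"_") or n.startswith(alias+"-")
def condA (n : List Char) (a : List Char) : Bool :=
  n == a || PySem.Chars.startswith n (a ++ ['_']) || PySem.Chars.startswith n (a ++ ['-'])

-- A, first inner loop: first exact alias match wins, break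
def aExactLoop (allA : List (List Char)) (norm : List (String × List Char))
    (d : PySem.Dict String String) (canon : String) : PySem.Dict String String :=
  match norm with
  | [] => d
  | (orig, n) :: rest =>
    if allA.contains n then d.insert canon orig else aExactLoop allA rest d canon

-- A, second inner loop: first exact-or-prefix match wins, break
def aPrefixLoop (allA : List (List Char)) (norm : List (String × List Char))
    (d : PySem.Dict String String) (canon : String) : PySem.Dict String String :=
  match norm with
  | [] => d
  | (orig, n) :: rest =>
    if allA.any (fun a => condA n a) then d.insert canon orig else aPrefixLoop allA rest d canon

-- A, body of the outer for-loop over SIGNAL_ALIASES.items()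
def aStep (norm : List (String × List Char)) (d : PySem.Dict String String)
    (canon : String) (aliases : List String) : PySem.Dict String String :=
  let allA := PySem.Chars.lower canon.toList :: aliases.map String.toList
  let d1 := aExactLoop allA norm d canon
  if d1.contains canon then d1 else aPrefixLoop allA norm d1 canon

def detect_signal_columns_py (headers : List String) : List (String × String) :=
  let norm := headers.map (fun h => (h, normaliseHeader h))
  (signalAliases.foldl (fun d ca => aStep norm d ca.1 ca.2) PySem.Dict.empty).items

-- ===== PORT B =====
-- B's prefix-only condition: any(n.startswith(a+"_") or n.startswith(a+"-") for a in all_aliases)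
def condB (allA : List (List Char)) (n : List Char) : Bool :=
  allA.any (fun a => PySem.Chars.startswith n (a ++ ['_']) || PySem.Chars.startswith n (a ++ ['-']))

-- B's single pass: break on exact match, else remember the first prefix match in fp; for-else commits fp at the end
def bLoop (allA : List (List Char)) (norm : List (String × List Char)) (fp : Option String)
    (d : PySem.Dict String String) (canon : String) : PySem.Dict String String :=
  match norm with
  | [] =>
    match fp with
    | some o => d.insert canon o
    | none => d
  | (orig, n) :: rest =>
    if allA.contains n then d.insert canon orig
    else if fp.isNone && condB allA n then bLoop allA rest (some orig) d canon
    else bLoop allA rest fp d canon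

def detect_signal_columns_py_alt (headers : List String) : List (String × String) :=
  let norm := headers.map (fun h => (h, normaliseHeader h))
  (signalAliases.foldl
    (fun d ca => bLoop (PySem.Chars.lower ca.1.toList :: ca.2.map String.toList) norm none d ca.1)
    PySem.Dict.empty).items

-- ===== PRECONDITION & SPEC =====
def Spec_detect_signal_columns_py (headers : List String) (out : List (String × String)) : Prop := out = detect_signal_columns_py_alt headers
instance (headers : List String) (out : List (String × String)) : Decidable (Spec_detect_signal_columns_py headers out) := by unfold Spec_detect_signal_columns_py; infer_instance

-- ===== CLAIM (what is proved, stated in full; the proofs are below) =====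
def Claim_equal_detect_signal_columns_py : Prop := ∀ (headers : List String), Dom_detect_signal_columns_py headers → Spec_detect_signal_columns_py headers (detect_signal_columns_py headers)

-- ===== LEMMAS AND PROOFS =====

theorem aExactLoop_eq (allA : List (List Char)) (norm : List (String × List Char))
    (d : PySem.Dict String String) (canon : String) :
    aExactLoop allA norm d canon =
      match norm.find? (fun p => allA.contains p.2) with
      | some p => d.insert canon p.1
      | none => d := by
  induction norm with
  | nil => rfl
  | cons hd tl ih =>
    obtain ⟨orig, n⟩ := hd
    by_cases h : n ∈ allA
    · simp [aExactLoop, List.find?, h]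
    · simp [aExactLoop, List.find?, h, ih]

theorem aPrefixLoop_eq (allA : List (List Char)) (norm : List (String × List Char))
    (d : PySem.Dict String String) (canon : String) :
    aPrefixLoop allA norm d canon =
      match norm.find? (fun p => allA.any (fun a => condA p.2 a)) with
      | some p => d.insert canon p.1
      | none => d := by
  induction norm with
  | nil => rfl
  | cons hd tl ih =>
    obtain ⟨orig, n⟩ := hd
    by_cases h : allA.any (fun a => condA n a)
    · simp [aPrefixLoop, List.find?, h]
    · simp [aPrefixLoop, List.find?, h, ih]

theorem bLoop_eq (allA : List (List Char)) (norm : List (String × List Char))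
    (fp : Option String) (d : PySem.Dict String String) (canon : String) :
    bLoop allA norm fp d canon =
      match norm.find? (fun p => allA.contains p.2) with
      | some p => d.insert canon p.1
      | none =>
        match fp with
        | some o => d.insert canon o
        | none =>
          match norm.find? (fun p => condB allA p.2) with
          | some p => d.insert canon p.1
          | none => d := by
  induction norm generalizing fp with
  | nil => cases fp <;> rfl
  | cons hd tl ih =>
    obtain ⟨orig, n⟩ := hd
    by_cases h : n ∈ allA
    · simp [bLoop, List.find?, h]
    · by_cases h2 : condB allA n
      · cases fp with
        | none => simp [bLoop, List.find?, h, h2, ih]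
        | some o => simp [bLoop, List.find?, h, h2, ih]
      · cases fp with
        | none => simp [bLoop, List.find?, h, h2, ih]
        | some o => simp [bLoop, List.find?, h, h2, ih]

-- when no header matches exactly, A's combined second-pass condition agrees with B's prefix-only condition
theorem find?_condA_eq (allA : List (List Char)) (norm : List (String × List Char))
    (hex : norm.find? (fun p => allA.contains p.2) = none) :
    norm.find? (fun p => allA.any (fun a => condA p.2 a)) = norm.find? (fun p => condB allA p.2) := by
  induction norm with
  | nil => rfl
  | cons hd tl ih =>
    simp only [List.find?_cons] at hex ⊢
    split at hex
    · exact absurd hex (by simp)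
    · rename_i hcon
      have hmem : hd.2 ∉ allA := by simpa using hcon
      have hcond : (allA.any (fun a => condA hd.2 a)) = condB allA hd.2 := by
        unfold condA condB
        rw [Bool.eq_iff_iff]
        simp only [List.any_eq_true, Bool.or_eq_true, beq_iff_eq]
        constructor
        · rintro ⟨a, ha, (rfl | h) | h⟩
          · exact absurd ha hmem
          · exact ⟨a, ha, Or.inl h⟩
          · exact ⟨a, ha, Or.inr h⟩
        · rintro ⟨a, ha, h | h⟩
          · exact ⟨a, ha, Or.inl (Or.inr h)⟩
          · exact ⟨a, ha, Or.inr h⟩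
      rw [hcond]
      cases hc2 : condB allA hd.2
      · exact ih hex
      · rfl

theorem step_eq (norm : List (String × List Char)) (d : PySem.Dict String String)
    (canon : String) (aliases : List String) (hd0 : d.contains canon = false) :
    aStep norm d canon aliases =
      bLoop (PySem.Chars.lower canon.toList :: aliases.map String.toList) norm none d canon := by
  set allA := PySem.Chars.lower canon.toList :: aliases.map String.toList with hall
  have hstep : aStep norm d canon aliases =
      (if (aExactLoop allA norm d canon).contains canon = true then aExactLoop allA norm d canon
       else aPrefixLoop allA norm (aExactLoop allA norm d canon) canon) := rfl
  rw [hstep, aExactLoop_eq, bLoop_eq]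
  cases hex : norm.find? (fun p => allA.contains p.2) with
  | some p => simp [PySem.Dict.contains_insert_self]
  | none =>
    rw [aPrefixLoop_eq, find?_condA_eq allA norm hex, hd0]
    simp

-- aStep touches only its own canon key
theorem aStep_contains_ne (norm : List (String × List Char)) (d : PySem.Dict String String)
    (canon : String) (aliases : List String) (c : String) (hne : c ≠ canon) :
    (aStep norm d canon aliases).contains c = d.contains c := by
  set allA := PySem.Chars.lower canon.toList :: aliases.map String.toList with hall
  have hstep : aStep norm d canon aliases =
      (if (aExactLoop allA norm d canon).contains canon = true then aExactLoop allA norm d canon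
       else aPrefixLoop allA norm (aExactLoop allA norm d canon) canon) := rfl
  rw [hstep, aExactLoop_eq]
  cases hex : norm.find? (fun p => allA.contains p.2) with
  | some p =>
    simp [PySem.Dict.contains_insert_self, PySem.Dict.contains_insert, hne]
  | none =>
    show (if d.contains canon = true then d else aPrefixLoop allA norm d canon).contains c = d.contains c
    rw [aPrefixLoop_eq]
    cases norm.find? (fun p => allA.any (fun a => condA p.2 a)) with
    | some p =>
      by_cases hc : d.contains canon = true <;> simp [hc, PySem.Dict.contains_insert, hne]
    | none => split <;> rfl

theorem fold_eq (table : List (String × List String)) (norm : List (String × List Char))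
    (d : PySem.Dict String String)
    (hnd : ∀ c ∈ table.map Prod.fst, d.contains c = false)
    (hdup : (table.map Prod.fst).Nodup) :
    table.foldl (fun d ca => aStep norm d ca.1 ca.2) d =
      table.foldl
        (fun d ca => bLoop (PySem.Chars.lower ca.1.toList :: ca.2.map String.toList) norm none d ca.1) d := by
  induction table generalizing d with
  | nil => rfl
  | cons hd0 tl ih =>
    obtain ⟨canon, aliases⟩ := hd0
    simp only [List.foldl_cons]
    rw [← step_eq norm d canon aliases (hnd canon (by simp))]
    refine ih (aStep norm d canon aliases) (fun c hc => ?_) (by simpa using hdup.of_cons)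
    have hcne : c ≠ canon := by
      rintro rfl
      exact (List.nodup_cons.mp (by simpa using hdup)).1 hc
    rw [aStep_contains_ne norm d canon aliases c hcne]
    exact hnd c (by simp [hc])

-- ===== VERDICT (by name: the statement is the Claim_ definition above) =====
theorem detect_signal_columns_py_spec : Claim_equal_detect_signal_columns_py := by
  intro headers _
  unfold Spec_detect_signal_columns_py detect_signal_columns_py detect_signal_columns_py_alt
  show (signalAliases.foldl _ PySem.Dict.empty).items = (signalAliases.foldl _ PySem.Dict.empty).items
  rw [fold_eq signalAliases (headers.map (fun h => (h, normaliseHeader h))) PySem.Dict.empty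
    (fun c _ => by simp) (by decide)]
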